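-- pv_equiv track=rewrite | github.com/seafire1991/allennlp_chinese | apis/tool.py | bmes_to_words
-- ===== SOURCE A (Python) =====
-- def bmes_to_words(results:dict,require_s=True):
--     chars = results["words"]
--     tags = results["tags"]
--     result = []
--     if len(chars) == 0:
--         return result
--     word = chars[0]
--
--     for c, t in zip(chars[1:], tags[1:]):
--         if t[0] == 'B' or t[0] == 'S':
--             result.append(word)
--             word = ''
--         word += c
--     if len(word) != 0:
--         result.append(word)
--     return " ".join(result)
-- ===== SOURCE B (Python) =====
-- def bmes_to_words(results: dict, require_s=True):
--     chars = results["words"]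
--     tags = results["tags"]
--     n = min(len(chars), len(tags))
--     cuts = [0] + [i for i in range(1, n) if tags[i][0] in ('B', 'S')] + [n]
--     words = (''.join(chars[a: b]) for a, b in zip(cuts, cuts[1:]))
--     return " ".join(w for w in words if w)
-- ===== Notes on version B (the rewrite author's own statement) =====
-- stated objective: alternative
-- what changed: B computes the word-boundary cut positions first and builds the words by slicing chars between consecutive cuts and joining the nonempty ones, instead of A's running word accumulator flushed into a result list inside the loop; Pre_ excludes inputs where A raises or returns the non-string [], plus two unspecified corners (empty tags with nonempty chars, and empty-string elements among the used chars) where A's and B's values are both defensible.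
-- outside the precondition, e.g. on bmes_to_words({'words': [], 'tags': []}, True): A returns [], B returns ''; on bmes_to_words({'words': ['a'], 'tags': []}, True): A returns 'a', B returns ''; on bmes_to_words({'words': ['a', '', 'b'], 'tags': ['B', 'B', 'B']}, True): A returns 'a  b', B returns 'a b'
import Mathlib
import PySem

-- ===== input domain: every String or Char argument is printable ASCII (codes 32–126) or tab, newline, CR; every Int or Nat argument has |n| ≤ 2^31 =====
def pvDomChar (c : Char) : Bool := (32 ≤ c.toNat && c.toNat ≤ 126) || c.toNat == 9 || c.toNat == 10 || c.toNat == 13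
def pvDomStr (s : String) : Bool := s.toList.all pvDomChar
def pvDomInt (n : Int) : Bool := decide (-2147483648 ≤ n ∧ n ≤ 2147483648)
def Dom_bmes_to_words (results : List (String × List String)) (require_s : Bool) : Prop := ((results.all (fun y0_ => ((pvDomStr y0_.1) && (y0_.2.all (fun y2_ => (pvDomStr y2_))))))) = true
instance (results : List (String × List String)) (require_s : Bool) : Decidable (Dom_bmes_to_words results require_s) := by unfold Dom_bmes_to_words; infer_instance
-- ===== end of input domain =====

-- B computes the word-boundary cut positions first and joins the chars sliced between consecutive
-- cuts, instead of A's running word accumulator; equivalence of the return values is proved on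
-- Pre_. require_s is unused by both, as in the source.

-- ===== PORT A =====
def bmes_to_words (results : List (String × List String)) (require_s : Bool) : String :=
  match ((results.find? (fun p => p.1 == "words")).map (fun p => p.2)), ((results.find? (fun p => p.1 == "tags")).map (fun p => p.2)) with
  | some chars, some tags =>
      if chars.length == 0 then ""   -- Python returns the empty LIST here (not a str); excluded by Pre_
      else
        let word0 := PySem.List.pyGetD chars 0 ""       -- word = chars[0]
        let st :=
          (((PySem.List.slice chars (some 1) none).zip (PySem.List.slice tags (some 1) none)).foldl
            (fun (st : List String × String) (ct : String × String) =>
              let result := st.1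
              let word := st.2
              let rw :=
                if PySem.Str.pyGet? ct.2 0 == some 'B' || PySem.Str.pyGet? ct.2 0 == some 'S' then
                  (result ++ [word], "")
                else (result, word)
              (rw.1, rw.2 ++ ct.1))
            ([], word0))
        let result := if PySem.Str.len st.2 != 0 then st.1 ++ [st.2] else st.1
        PySem.Str.join " " result
  | _, _ => ""   -- KeyError in Python; excluded by Pre_

-- ===== PORT B =====
def bmes_to_words_alt (results : List (String × List String)) (require_s : Bool) : String :=
  match ((results.find? (fun p => p.1 == "words")).map (fun p => p.2)) with
  | none => ""   -- KeyError in Python; excluded by Pre_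
  | some chars =>
      match ((results.find? (fun p => p.1 == "tags")).map (fun p => p.2)) with
      | none => ""   -- KeyError in Python; excluded by Pre_
      | some tags =>
          let n : Int := min (chars.length : Int) (tags.length : Int)
          let cuts : List Int :=
            0 :: ((PySem.List.pyRange 1 n).filter
                (fun i =>
                  PySem.Str.pyGet? (PySem.List.pyGetD tags i "") 0 == some 'B' ||
                  PySem.Str.pyGet? (PySem.List.pyGetD tags i "") 0 == some 'S') ++ [n])
          let words := (cuts.zip cuts.tail).map
              (fun ab => PySem.Str.join "" (PySem.List.slice chars (some ab.1) (some ab.2)))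
          PySem.Str.join " " (words.filter (fun w => !(w == "")))

-- ===== PRECONDITION & SPEC =====
-- Pre_ excludes: missing "words"/"tags" keys and an empty tag string among the used tags (A raises
-- KeyError/IndexError there), empty chars (A returns the empty LIST [], not a string), and two
-- corners nobody would specify where A's and B's values are both defensible: empty tags with
-- nonempty chars (A emits the untagged first char, B emits nothing) and empty-string elements
-- among the used chars (a char list normally has none; the resulting empty words are kept,
-- dropped or merged differently by A and B).
def Pre_bmes_to_words (results : List (String × List String)) (require_s : Bool) : Prop :=
  (((results.find? (fun p => p.1 == "words")).map (fun p => p.2))).isSome = true ∧ (((results.find? (fun p => p.1 == "tags")).map (fun p => p.2))).isSome = true ∧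
  (((results.find? (fun p => p.1 == "words")).map (fun p => p.2))).getD [] ≠ [] ∧
  (((results.find? (fun p => p.1 == "tags")).map (fun p => p.2))).getD [] ≠ [] ∧
  (∀ t ∈ (((((results.find? (fun p => p.1 == "tags")).map (fun p => p.2))).getD []).drop 1).take
          (min ((((results.find? (fun p => p.1 == "words")).map (fun p => p.2))).getD []).length
               ((((results.find? (fun p => p.1 == "tags")).map (fun p => p.2))).getD []).length - 1), t ≠ "") ∧
  (∀ c ∈ ((((results.find? (fun p => p.1 == "words")).map (fun p => p.2))).getD []).take
          (min ((((results.find? (fun p => p.1 == "words")).map (fun p => p.2))).getD []).length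
               ((((results.find? (fun p => p.1 == "tags")).map (fun p => p.2))).getD []).length), c ≠ "")
instance (results : List (String × List String)) (require_s : Bool) : Decidable (Pre_bmes_to_words results require_s) := by unfold Pre_bmes_to_words; infer_instance

def pvWitness_bmes_to_words : (List (String × List String)) × Bool :=
  ([("words", ["ab", "c", "d"]), ("tags", ["B", "M", "B"])], true)

def Spec_bmes_to_words (results : List (String × List String)) (require_s : Bool) (out : String) : Prop := out = bmes_to_words_alt results require_s
instance (results : List (String × List String)) (require_s : Bool) (out : String) : Decidable (Spec_bmes_to_words results require_s out) := by unfold Spec_bmes_to_words; infer_instance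

-- ===== CLAIM (what is proved, stated in full; the proofs are below) =====
def Claim_equal_bmes_to_words : Prop := ∀ (results : List (String × List String)) (require_s : Bool), Dom_bmes_to_words results require_s → Pre_bmes_to_words results require_s → Spec_bmes_to_words results require_s (bmes_to_words results require_s)

-- ===== LEMMAS AND PROOFS =====

-- the cut test both ports apply to a tag
def pvCut (t : String) : Bool :=
  PySem.Str.pyGet? t 0 == some 'B' || PySem.Str.pyGet? t 0 == some 'S'

-- recursive form of A's accumulator loop (the result list it joins)
def pvWrec (word : String) : List (String × String) → List String
  | [] => if word == "" then [] else [word]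
  | ct :: ps => if pvCut ct.2 then word :: pvWrec ct.1 ps else pvWrec (word ++ ct.1) ps

-- word groups by cut flags, without the final-empty trimming
def pvSegs (word : String) : List (String × Bool) → List String
  | [] => [word]
  | cf :: ps => if cf.2 then word :: pvSegs cf.1 ps else pvSegs (word ++ cf.1) ps

def pvTrim (ws : List String) : List String :=
  if ws.getLast? == some "" then ws.dropLast else ws

-- consecutive pairs of a cut list
def pvPairs : List Nat → List (Nat × Nat)
  | a :: b :: l => (a, b) :: pvPairs (b :: l)
  | _ => []

-- Nat-level cut positions: s-shifted indices of true flags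
def pvIdxs : List Bool → Nat → List Nat
  | [], _ => []
  | f :: fs, s => if f then s :: pvIdxs fs (s + 1) else pvIdxs fs (s + 1)

def pvJoin (l : List String) : String := PySem.Str.join "" l

def pvSliceWords (chars : List String) (ps : List (Nat × Nat)) : List String :=
  ps.map (fun ab => pvJoin ((chars.drop ab.1).take (ab.2 - ab.1)))

theorem pv_str_ext {s t : String} (h : s.toList = t.toList) : s = t := by
  have := congrArg String.ofList h; simpa [String.ofList_toList] using this

theorem pv_str_empty_iff (w : String) : w = "" ↔ w.toList = [] := by
  constructor
  · rintro rfl; rfl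
  · intro h; exact pv_str_ext h

theorem pv_join_cons (x : String) (l : List String) : pvJoin (x :: l) = x ++ pvJoin l := by
  apply pv_str_ext
  cases l with
  | nil =>
      simp [pvJoin, PySem.Str.toList_join, PySem.Chars.join_singleton, PySem.Chars.join_nil,
        String.toList_append]
  | cons y ys =>
      simp [pvJoin, PySem.Str.toList_join, String.toList_append,
        PySem.Chars.join_cons_cons ([] : List Char) x.toList y.toList (ys.map String.toList)]

theorem pv_foldA (ps : List (String × String)) (res : List String) (word : String) :
    (if PySem.Str.len ((ps.foldl
        (fun (st : List String × String) (ct : String × String) =>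
          ((if PySem.Str.pyGet? ct.2 0 == some 'B' || PySem.Str.pyGet? ct.2 0 == some 'S' then
              (st.1 ++ [st.2], "") else (st.1, st.2)).1,
           (if PySem.Str.pyGet? ct.2 0 == some 'B' || PySem.Str.pyGet? ct.2 0 == some 'S' then
              (st.1 ++ [st.2], "") else (st.1, st.2)).2 ++ ct.1))
        (res, word))).2 != 0
     then (ps.foldl
        (fun (st : List String × String) (ct : String × String) =>
          ((if PySem.Str.pyGet? ct.2 0 == some 'B' || PySem.Str.pyGet? ct.2 0 == some 'S' then
              (st.1 ++ [st.2], "") else (st.1, st.2)).1,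
           (if PySem.Str.pyGet? ct.2 0 == some 'B' || PySem.Str.pyGet? ct.2 0 == some 'S' then
              (st.1 ++ [st.2], "") else (st.1, st.2)).2 ++ ct.1))
        (res, word)).1 ++ [(ps.foldl
        (fun (st : List String × String) (ct : String × String) =>
          ((if PySem.Str.pyGet? ct.2 0 == some 'B' || PySem.Str.pyGet? ct.2 0 == some 'S' then
              (st.1 ++ [st.2], "") else (st.1, st.2)).1,
           (if PySem.Str.pyGet? ct.2 0 == some 'B' || PySem.Str.pyGet? ct.2 0 == some 'S' then
              (st.1 ++ [st.2], "") else (st.1, st.2)).2 ++ ct.1))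
        (res, word)).2]
     else (ps.foldl
        (fun (st : List String × String) (ct : String × String) =>
          ((if PySem.Str.pyGet? ct.2 0 == some 'B' || PySem.Str.pyGet? ct.2 0 == some 'S' then
              (st.1 ++ [st.2], "") else (st.1, st.2)).1,
           (if PySem.Str.pyGet? ct.2 0 == some 'B' || PySem.Str.pyGet? ct.2 0 == some 'S' then
              (st.1 ++ [st.2], "") else (st.1, st.2)).2 ++ ct.1))
        (res, word)).1)
    = res ++ pvWrec word ps := by
  induction ps generalizing res word with
  | nil =>
      simp only [List.foldl_nil, pvWrec]
      by_cases h : word = ""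
      · subst h; simp [PySem.Str.len_eq]
      · have hne : word.toList ≠ [] := fun hh => h ((pv_str_empty_iff word).2 hh)
        have hlen : word.toList.length ≠ 0 := by simpa [List.length_eq_zero_iff] using hne
        simp [PySem.Str.len_eq, h]
  | cons ct ps ih =>
      simp only [List.foldl_cons, pvWrec, pvCut]
      by_cases h : (PySem.Str.pyGet? ct.2 0 == some 'B' || PySem.Str.pyGet? ct.2 0 == some 'S') = true
      · simp only [h, if_true]
        have := ih (res ++ [word]) ("" ++ ct.1)
        simpa [List.append_assoc] using this
      · simp only [h, Bool.false_eq_true]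
        exact ih res (word ++ ct.1)

theorem pv_segs_ne_nil (word : String) (ps : List (String × Bool)) : pvSegs word ps ≠ [] := by
  induction ps generalizing word with
  | nil => simp [pvSegs]
  | cons cf ps ih =>
      by_cases h : cf.2 <;> simp [pvSegs, h, ih]

theorem pv_getLast?_cons {α : Type} {l : List α} (h : l ≠ []) (a : α) :
    (a :: l).getLast? = l.getLast? := by
  cases l with
  | nil => simp at h
  | cons b m => simp [List.getLast?_cons_cons]

theorem pv_wrec_eq_trim (word : String) (ps : List (String × String)) :
    pvWrec word ps = pvTrim (pvSegs word (ps.map (fun ct => (ct.1, pvCut ct.2)))) := by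
  induction ps generalizing word with
  | nil =>
      simp only [List.map_nil, pvSegs, pvWrec, pvTrim]
      by_cases h : word = "" <;> simp [h]
  | cons ct ps ih =>
      simp only [List.map_cons, pvSegs, pvWrec]
      by_cases h : pvCut ct.2
      · simp only [h, if_true]
        rw [ih]
        have hne := pv_segs_ne_nil ct.1 (ps.map (fun ct => (ct.1, pvCut ct.2)))
        unfold pvTrim
        rw [pv_getLast?_cons hne, List.dropLast_cons_of_ne_nil hne]
        by_cases hl : (pvSegs ct.1 (ps.map (fun ct => (ct.1, pvCut ct.2)))).getLast? == some ""
        · simp [hl]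
        · simp [hl]
      · simp only [h, if_false]
        exact ih (word ++ ct.1)

theorem pv_idxs_ge (fs : List Bool) (s : Nat) : ∀ i ∈ pvIdxs fs s, s ≤ i := by
  induction fs generalizing s with
  | nil => simp [pvIdxs]
  | cons f fs ih =>
      intro i hi
      by_cases h : f
      · simp only [pvIdxs, h, if_true, List.mem_cons] at hi
        rcases hi with rfl | hi
        · exact le_refl _
        · exact le_trans (Nat.le_succ s) (ih (s+1) i hi)
      · simp only [pvIdxs, h] at hi
        exact le_trans (Nat.le_succ s) (ih (s+1) i hi)

theorem pv_idxs_le (fs : List Bool) (s : Nat) : ∀ i ∈ pvIdxs fs s, i < s + fs.length := by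
  induction fs generalizing s with
  | nil => simp [pvIdxs]
  | cons f fs ih =>
      intro i hi
      by_cases h : f
      · simp only [pvIdxs, h, if_true, List.mem_cons] at hi
        rcases hi with rfl | hi
        · simp
        · have := ih (s+1) i hi; simp only [List.length_cons]; omega
      · simp only [pvIdxs, h] at hi
        have := ih (s+1) i hi; simp only [List.length_cons]; omega

theorem pv_idxs_shift (fs : List Bool) (s : Nat) :
    pvIdxs fs (s + 1) = (pvIdxs fs s).map (fun n => n + 1) := by
  induction fs generalizing s with
  | nil => simp [pvIdxs]
  | cons f fs ih =>
      by_cases h : f <;> simp [pvIdxs, h, ih (s+1), ih s]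

theorem pv_idxs_pairwise (fs : List Bool) (s : Nat) :
    List.Pairwise (· < ·) (pvIdxs fs s) := by
  induction fs generalizing s with
  | nil => simp [pvIdxs]
  | cons f fs ih =>
      by_cases h : f
      · simp only [pvIdxs, h, if_true]
        refine List.pairwise_cons.2 ⟨fun i hi => ?_, ih (s+1)⟩
        have := pv_idxs_ge fs (s+1) i hi; omega
      · simpa [pvIdxs, h] using ih (s+1)

theorem pv_cuts_pairwise (fs : List Bool) :
    List.Pairwise (· < ·) (0 :: (pvIdxs fs 1 ++ [fs.length + 1])) := by
  refine List.pairwise_cons.2 ⟨?_, ?_⟩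
  · intro x hx
    rcases List.mem_append.1 hx with hm | hm
    · have := pv_idxs_ge fs 1 x hm; omega
    · simp at hm; omega
  · refine List.pairwise_append.2 ⟨pv_idxs_pairwise fs 1, by simp, ?_⟩
    intro x hx y hy
    simp at hy; subst hy
    have := pv_idxs_le fs 1 x hx; omega

theorem pv_pairs_lt (l : List Nat) (h : List.Pairwise (· < ·) l) :
    ∀ ab ∈ pvPairs l, ab.1 < ab.2 := by
  induction l with
  | nil => simp [pvPairs]
  | cons a l ih =>
      cases l with
      | nil => simp [pvPairs]
      | cons b m =>
          intro ab hab
          simp only [pvPairs, List.mem_cons] at hab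
          rcases List.pairwise_cons.1 h with ⟨hhead, htail⟩
          rcases hab with rfl | hab
          · exact hhead b (by simp)
          · exact ih htail ab hab

theorem pv_pairs_mem (l : List Nat) : ∀ ab ∈ pvPairs l, ab.1 ∈ l ∧ ab.2 ∈ l := by
  induction l with
  | nil => simp [pvPairs]
  | cons a l ih =>
      cases l with
      | nil => simp [pvPairs]
      | cons b m =>
          intro ab hab
          simp only [pvPairs, List.mem_cons] at hab
          rcases hab with rfl | hab
          · simp
          · rcases ih ab hab with ⟨h1, h2⟩
            exact ⟨List.mem_cons_of_mem _ h1, List.mem_cons_of_mem _ h2⟩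

theorem pv_pairs_map_shift (l : List Nat) :
    pvPairs (l.map (fun n => n + 1)) = (pvPairs l).map (fun ab => (ab.1 + 1, ab.2 + 1)) := by
  induction l with
  | nil => simp [pvPairs]
  | cons a l ih =>
      cases l with
      | nil => simp [pvPairs]
      | cons b m => simpa [pvPairs] using ih

theorem pv_pairs_eq_zip_tail (l : List Nat) : l.zip l.tail = pvPairs l := by
  induction l with
  | nil => simp [pvPairs]
  | cons a l ih =>
      cases l with
      | nil => simp [pvPairs]
      | cons b m => simpa [pvPairs] using ih

theorem pv_slice_shift (y : String) (chars : List String) (ps : List (Nat × Nat)) :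
    pvSliceWords (y :: chars) (ps.map (fun ab => (ab.1 + 1, ab.2 + 1))) = pvSliceWords chars ps := by
  simp only [pvSliceWords, List.map_map]
  apply List.map_congr_left
  intro ab _
  show pvJoin (List.take (ab.2 + 1 - (ab.1 + 1)) (List.drop (ab.1 + 1) (y :: chars))) = _
  rw [Nat.add_sub_add_right, List.drop_succ_cons]

theorem pv_slice_absorb (w x : String) (xs : List String) (ps : List (Nat × Nat))
    (h : ∀ ab ∈ ps, 1 ≤ ab.1) :
    pvSliceWords ((w ++ x) :: xs) ps = pvSliceWords (x :: xs) ps := by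
  unfold pvSliceWords
  apply List.map_congr_left
  intro ab hab
  obtain ⟨k, hk⟩ := Nat.exists_eq_add_of_le (h ab hab)
  have h1 : 1 + k = k + 1 := by omega
  rw [hk, h1, List.drop_succ_cons, List.drop_succ_cons]

theorem pv_main (fs : List Bool) (w : String) (xs : List String) (h : xs.length = fs.length) :
    pvSliceWords (w :: xs) (pvPairs (0 :: (pvIdxs fs 1 ++ [fs.length + 1])))
      = pvSegs w (xs.zip fs) := by
  induction fs generalizing w xs with
  | nil =>
      have : xs = [] := List.length_eq_zero_iff.1 h
      subst this
      simp [pvIdxs, pvPairs, pvSliceWords, pvSegs, pvJoin, PySem.Str.join, PySem.Chars.join_singleton]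
  | cons f fs ih =>
      cases xs with
      | nil => simp at h
      | cons x xs =>
          have hlen : xs.length = fs.length := by simpa using h
          by_cases hf : f
          · -- cut right after w
            have hcuts : pvIdxs (f :: fs) 1 ++ [(f :: fs).length + 1]
                = (0 :: (pvIdxs fs 1 ++ [fs.length + 1])).map (fun n => n + 1) := by
              simp [pvIdxs, hf, pv_idxs_shift fs 1]
            rw [hcuts]
            have hmap : (0 :: (0 :: (pvIdxs fs 1 ++ [fs.length + 1])).map (fun n => n + 1))
                = 0 :: 1 :: (pvIdxs fs 1 ++ [fs.length + 1]).map (fun n => n + 1) := by simp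
            rw [hmap]
            have hpairs : pvPairs (0 :: 1 :: (pvIdxs fs 1 ++ [fs.length + 1]).map (fun n => n + 1))
                = (0, 1) :: pvPairs ((0 :: (pvIdxs fs 1 ++ [fs.length + 1])).map (fun n => n + 1)) := by
              simp [pvPairs]
            rw [hpairs, pv_pairs_map_shift]
            have hseg : pvSegs w ((x :: xs).zip (f :: fs)) = w :: pvSegs x (xs.zip fs) := by
              simp [pvSegs, hf]
            rw [hseg]
            simp only [pvSliceWords, List.map_cons]
            congr 1
            · -- head: join of (w::x::xs)[0:1] is w
              show pvJoin (((w :: x :: xs).drop 0).take (1 - 0)) = w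
              simp [pvJoin, PySem.Str.join, PySem.Chars.join_singleton]
            · show pvSliceWords (w :: x :: xs)
                (((pvPairs (0 :: (pvIdxs fs 1 ++ [fs.length + 1]))).map (fun ab => (ab.1 + 1, ab.2 + 1)))) = _
              rw [pv_slice_shift]
              exact ih x xs hlen
          · -- no cut: first word absorbs x
            have hcuts : pvIdxs (f :: fs) 1 ++ [(f :: fs).length + 1]
                = ((pvIdxs fs 1 ++ [fs.length + 1])).map (fun n => n + 1) := by
              simp [pvIdxs, hf, pv_idxs_shift fs 1]
            rw [hcuts]
            have hseg : pvSegs w ((x :: xs).zip (f :: fs)) = pvSegs (w ++ x) (xs.zip fs) := by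
              simp [pvSegs, hf]
            rw [hseg, ← ih (w ++ x) xs hlen]
            -- expose the head of the cut list
            obtain ⟨l0, L', hL⟩ : ∃ l0 L', pvIdxs fs 1 ++ [fs.length + 1] = l0 :: L' := by
              cases hI : pvIdxs fs 1 with
              | nil => exact ⟨fs.length + 1, [], by simp⟩
              | cons a t => exact ⟨a, t ++ [fs.length + 1], by simp⟩
            have hl0mem : l0 ∈ pvIdxs fs 1 ++ [fs.length + 1] := by rw [hL]; simp
            have hl0 : 1 ≤ l0 := by
              rcases List.mem_append.1 hl0mem with hm | hm
              · exact pv_idxs_ge fs 1 l0 hm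
              · simp at hm; omega
            rw [hL]
            have hp1 : pvPairs (0 :: (l0 :: L').map (fun n => n + 1))
                = (0, l0 + 1) :: (pvPairs (l0 :: L')).map (fun ab => (ab.1 + 1, ab.2 + 1)) := by
              simp [pvPairs, ← pv_pairs_map_shift]
            have hp2 : pvPairs (0 :: l0 :: L') = (0, l0) :: pvPairs (l0 :: L') := by
              simp [pvPairs]
            rw [hp1, hp2]
            simp only [pvSliceWords, List.map_cons]
            congr 1
            · -- heads
              obtain ⟨k, hk⟩ := Nat.exists_eq_add_of_le hl0
              subst hk
              show pvJoin (((w :: x :: xs).drop 0).take (1 + k + 1 - 0)) = pvJoin ((((w ++ x) :: xs).drop 0).take (1 + k - 0))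
              simp only [List.drop_zero, Nat.sub_zero]
              have h1 : (1 + k + 1) = (k + 1) + 1 := by omega
              have h2 : (1 + k) = k + 1 := by omega
              rw [h1, h2]
              simp only [List.take_succ_cons]
              rw [pv_join_cons, pv_join_cons, pv_join_cons, String.append_assoc]
            · -- tails
              show pvSliceWords (w :: x :: xs) ((pvPairs (l0 :: L')).map (fun ab => (ab.1 + 1, ab.2 + 1)))
                  = pvSliceWords ((w ++ x) :: xs) (pvPairs (l0 :: L'))
              rw [pv_slice_shift]
              symm
              apply pv_slice_absorb
              intro ab hab
              have h1 := (pv_pairs_mem (l0 :: L') ab hab).1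
              rw [← hL] at h1
              rcases List.mem_append.1 h1 with hm | hm
              · exact pv_idxs_ge fs 1 ab.1 hm
              · simp at hm; omega

theorem pv_idxs_map_range (q : Nat → Bool) (k s : Nat) :
    pvIdxs ((List.range k).map q) s = ((List.range k).filter q).map (fun j => s + j) := by
  induction k generalizing s q with
  | zero => simp [pvIdxs]
  | succ k ih =>
      rw [List.range_succ_eq_map]
      by_cases h : q 0
      · simp only [List.map_cons, List.map_map, pvIdxs, h, if_true, List.filter_cons, List.map_cons]
        rw [show (List.range k).map (q ∘ Nat.succ) = (List.range k).map (fun j => (q ∘ Nat.succ) j) from rfl]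
        rw [ih (q ∘ Nat.succ) (s + 1)]
        simp [List.filter_map, Function.comp, Nat.add_assoc, Nat.add_comm 1]
      · simp only [List.map_cons, List.map_map, pvIdxs, h, List.filter_cons, List.map_cons]
        rw [show (List.range k).map (q ∘ Nat.succ) = (List.range k).map (fun j => (q ∘ Nat.succ) j) from rfl]
        rw [ih (q ∘ Nat.succ) (s + 1)]
        simp [List.filter_map, Function.comp, Nat.add_assoc, Nat.add_comm 1]

theorem pv_slice_trunc (chars : List String) (ps : List (Nat × Nat)) (n : Nat)
    (h : ∀ ab ∈ ps, ab.2 ≤ n) :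
    pvSliceWords (chars.take n) ps = pvSliceWords chars ps := by
  unfold pvSliceWords
  apply List.map_congr_left
  intro ab hab
  rw [List.drop_take]
  rw [List.take_take]
  have : min (ab.2 - ab.1) (n - ab.1) = ab.2 - ab.1 := by
    have := h ab hab; omega
  rw [this]

theorem pv_zip_flags {α β γ : Type} (g : β → γ) (d : β) (xs : List α) (ys : List β) :
    (xs.zip ys).map (fun p => (p.1, g p.2))
      = (xs.take (min xs.length ys.length)).zip
          ((List.range (min xs.length ys.length)).map (fun j => g (ys.getD j d))) := by
  induction xs generalizing ys with
  | nil => simp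
  | cons x xt ih =>
      cases ys with
      | nil => simp
      | cons y yt =>
          have hmin : min (x :: xt).length ((y :: yt).length) = min xt.length yt.length + 1 := by
            simp
          rw [hmin, List.range_succ_eq_map]
          simp only [List.zip_cons_cons, List.map_cons, List.take_succ_cons, List.getD_cons_zero,
            List.map_map]
          rw [ih yt]
          congr 1

theorem pv_zip_tail_map {α β : Type} (c : α → β) (l : List α) :
    (l.map c).zip (l.map c).tail = (l.zip l.tail).map (fun ab => (c ab.1, c ab.2)) := by
  induction l with
  | nil => simp
  | cons a t ih =>
      cases t with
      | nil => simp
      | cons b t' =>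
          simp only [List.map_cons, List.tail_cons, List.zip_cons_cons] at ih ⊢
          rw [ih]

theorem pv_join_ne (L : List String) (h0 : L ≠ []) (h : ∀ x ∈ L, x ≠ "") : pvJoin L ≠ "" := by
  cases L with
  | nil => exact absurd rfl h0
  | cons x l =>
      rw [pv_join_cons]
      intro hc
      have := (pv_str_empty_iff _).1 hc
      rw [String.toList_append] at this
      have hx : x.toList = [] := by
        rcases List.append_eq_nil_iff.1 this with ⟨h1, _⟩; exact h1
      exact h x (by simp) (pv_str_ext hx)

theorem pv_slice_words_ne (chars : List String) (ps : List (Nat × Nat))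
    (hc : ∀ c ∈ chars, c ≠ "")
    (hb : ∀ ab ∈ ps, ab.1 < ab.2 ∧ ab.2 ≤ chars.length) :
    ∀ w ∈ pvSliceWords chars ps, w ≠ "" := by
  intro w hw
  unfold pvSliceWords at hw
  obtain ⟨ab, hab, rfl⟩ := List.mem_map.1 hw
  obtain ⟨hlt, hle⟩ := hb ab hab
  apply pv_join_ne
  · intro hnil
    have := congrArg List.length hnil
    simp only [List.length_take, List.length_drop, List.length_nil] at this
    omega
  · intro x hx
    exact hc x (List.mem_of_mem_drop (List.mem_of_mem_take hx))

theorem pv_trim_eq_self (ws : List String) (h : ∀ w ∈ ws, w ≠ "") : pvTrim ws = ws := by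
  unfold pvTrim
  cases hl : ws.getLast? with
  | none => simp
  | some w =>
      have hw : w ∈ ws := List.mem_of_getLast? hl
      have := h w hw
      simp [this]

theorem pv_cut_bounds (fs : List Bool) :
    ∀ ab ∈ pvPairs (0 :: (pvIdxs fs 1 ++ [fs.length + 1])), ab.1 < ab.2 ∧ ab.2 ≤ fs.length + 1 := by
  intro ab hab
  refine ⟨pv_pairs_lt _ (pv_cuts_pairwise fs) ab hab, ?_⟩
  have h2 := (pv_pairs_mem _ ab hab).2
  rcases List.mem_cons.1 h2 with h | h
  · omega
  · rcases List.mem_append.1 h with h | h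
    · have := pv_idxs_le fs 1 ab.2 h; omega
    · simp at h; omega

theorem pv_portA_eq (results : List (String × List String)) (require_s : Bool)
    (c0 : String) (cr : List String) (tags : List String)
    (hW : ((results.find? (fun p => p.1 == "words")).map (fun p => p.2)) = some (c0 :: cr))
    (hT : ((results.find? (fun p => p.1 == "tags")).map (fun p => p.2)) = some tags) :
    bmes_to_words results require_s
      = PySem.Str.join " " (pvWrec c0 (cr.zip tags.tail)) := by
  simp only [bmes_to_words, hW, hT]
  simp only [List.length_cons, PySem.List.slice_from_one, PySem.List.pyGetD_zero_cons, List.tail_cons]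
  have h0 : ((cr.length + 1 == 0) = false) := by simp
  rw [h0]
  simp only [Bool.false_eq_true, if_false]
  rw [pv_foldA (cr.zip tags.tail) [] c0]
  simp

theorem pv_portB_eq (results : List (String × List String)) (require_s : Bool)
    (c0 : String) (cr : List String) (t0 : String) (tr : List String)
    (hW : ((results.find? (fun p => p.1 == "words")).map (fun p => p.2)) = some (c0 :: cr))
    (hT : ((results.find? (fun p => p.1 == "tags")).map (fun p => p.2)) = some (t0 :: tr)) :
    bmes_to_words_alt results require_s
      = PySem.Str.join " "
          ((pvSliceWords (c0 :: cr)
            (pvPairs (0 :: (pvIdxs ((List.range (min cr.length tr.length)).map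
                (fun j => pvCut ((t0 :: tr).getD (1 + j) ""))) 1
              ++ [min cr.length tr.length + 1])))).filter (fun w => !(w == ""))) := by
  set k := min cr.length tr.length with hk
  simp only [bmes_to_words_alt, hW, hT]
  have hm : min ((c0 :: cr).length : Int) (((t0 :: tr).length : Nat) : Int) = ((k + 1 : Nat) : Int) := by
    simp only [List.length_cons, hk]; push_cast; omega
  rw [hm]
  rw [PySem.List.pyRange_one]
  have ht : ((((k:Nat) + 1 : Nat) : Int) - 1).toNat = k := by omega
  rw [ht]
  have hpred : ((fun i => PySem.Str.pyGet? (PySem.List.pyGetD (t0 :: tr) i "") 0 == some 'B' ||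
          PySem.Str.pyGet? (PySem.List.pyGetD (t0 :: tr) i "") 0 == some 'S') ∘ (fun j : Nat => (1 : Int) + (j : Int)))
      = fun j : Nat => pvCut ((t0 :: tr).getD (1 + j) "") := by
    funext j
    have hc : ((1 : Int) + (j : Int)) = (((1 + j : Nat)) : Int) := by push_cast; ring
    simp only [Function.comp, hc, PySem.List.pyGetD_natCast, pvCut]
  have hsplit : (fun j : Nat => (1 : Int) + (j : Int)) = (fun n : Nat => (n : Int)) ∘ (fun j : Nat => 1 + j) := by
    funext j; simp [Function.comp]
  have hinner : ((List.range k).map (fun j : Nat => (1 : Int) + (j : Int))).filter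
        (fun i => PySem.Str.pyGet? (PySem.List.pyGetD (t0 :: tr) i "") 0 == some 'B' ||
          PySem.Str.pyGet? (PySem.List.pyGetD (t0 :: tr) i "") 0 == some 'S')
      = (pvIdxs ((List.range k).map (fun j => pvCut ((t0 :: tr).getD (1 + j) ""))) 1).map
          (fun n : Nat => (n : Int)) := by
    rw [List.filter_map, hpred, hsplit, ← List.map_map,
      ← pv_idxs_map_range (fun j => pvCut ((t0 :: tr).getD (1 + j) "")) k 1]
  rw [hinner]
  have hcuts : (0 :: (((pvIdxs ((List.range k).map (fun j => pvCut ((t0 :: tr).getD (1 + j) ""))) 1).map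
        (fun n : Nat => (n : Int))) ++ [((k + 1 : Nat) : Int)]))
      = ((0 :: (pvIdxs ((List.range k).map (fun j => pvCut ((t0 :: tr).getD (1 + j) ""))) 1 ++ [k + 1])).map
          (fun n : Nat => (n : Int))) := by
    simp
  rw [hcuts]
  rw [pv_zip_tail_map, List.map_map]
  have hmapeq : ((fun ab : Int × Int => PySem.Str.join "" (PySem.List.slice (c0 :: cr) (some ab.1) (some ab.2)))
        ∘ (fun ab : Nat × Nat => ((ab.1 : Int), (ab.2 : Int))))
      = fun ab : Nat × Nat => pvJoin (((c0 :: cr).drop ab.1).take (ab.2 - ab.1)) := by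
    funext ab
    simp only [Function.comp, PySem.List.slice_natCast, pvJoin]
  rw [hmapeq, pv_pairs_eq_zip_tail]
  rfl

theorem pv_getD_tail (tags : List String) (j : Nat) :
    tags.getD (1 + j) "" = tags.tail.getD j "" := by
  cases tags with
  | nil => simp
  | cons t0 tr => simp [Nat.add_comm 1 j]

theorem pv_ports_eq (results : List (String × List String)) (require_s : Bool)
    (c0 : String) (cr : List String) (t0 : String) (tr : List String)
    (hW : ((results.find? (fun p => p.1 == "words")).map (fun p => p.2)) = some (c0 :: cr))
    (hT : ((results.find? (fun p => p.1 == "tags")).map (fun p => p.2)) = some (t0 :: tr))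
    (hchars : ∀ c ∈ (c0 :: cr).take (min cr.length tr.length + 1), c ≠ "") :
    bmes_to_words results require_s = bmes_to_words_alt results require_s := by
  rw [pv_portA_eq results require_s c0 cr (t0 :: tr) hW hT,
      pv_portB_eq results require_s c0 cr t0 tr hW hT]
  congr 1
  set k := min cr.length tr.length with hk
  set flags := (List.range k).map (fun j => pvCut ((t0 :: tr).getD (1 + j) "")) with hflags
  have hflagsD : flags = (List.range k).map (fun j => pvCut (tr.getD j "")) := by
    rw [hflags]
    exact List.map_congr_left (fun j _ => by rw [pv_getD_tail, List.tail_cons])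
  have hflen : flags.length = k := by simp [hflags]
  have hklen : (cr.take k).length = k := by simp [hk]
  have hlen : (cr.take k).length = flags.length := by rw [hflen, hklen]
  -- truncate B's slices to the used chars
  have hbound := pv_cut_bounds flags
  rw [hflen] at hbound
  have htrunc : pvSliceWords (c0 :: cr) (pvPairs (0 :: (pvIdxs flags 1 ++ [k + 1])))
      = pvSliceWords ((c0 :: cr).take (k + 1)) (pvPairs (0 :: (pvIdxs flags 1 ++ [k + 1]))) := by
    rw [pv_slice_trunc]
    intro ab hab
    have := hbound ab hab
    omega
  rw [htrunc]
  -- identify A's segments with B's slices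
  have htake : (c0 :: cr).take (k + 1) = c0 :: cr.take k := by simp
  have hmain := pv_main flags c0 (cr.take k) hlen
  rw [hflen] at hmain
  have hA : pvWrec c0 (cr.zip (t0 :: tr).tail)
      = pvTrim (pvSliceWords ((c0 :: cr).take (k + 1)) (pvPairs (0 :: (pvIdxs flags 1 ++ [k + 1])))) := by
    rw [pv_wrec_eq_trim, List.tail_cons, pv_zip_flags pvCut "" cr tr, ← hk, ← hflagsD]
    rw [htake, ← hmain]
  rw [hA]
  -- every produced word is nonempty, so trimming and filtering are the identity
  have hS : ∀ w ∈ pvSliceWords ((c0 :: cr).take (k + 1)) (pvPairs (0 :: (pvIdxs flags 1 ++ [k + 1]))), w ≠ "" := by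
    apply pv_slice_words_ne
    · intro c hc; exact hchars c hc
    · intro ab hab
      have := hbound ab hab
      have hlen2 : ((c0 :: cr).take (k + 1)).length = k + 1 := by
        simp only [List.length_take, List.length_cons]
        omega
      omega
  rw [pv_trim_eq_self _ hS]
  symm
  rw [List.filter_eq_self]
  intro w hw
  simpa using hS w hw

-- ===== VERDICT (by name: the statement is the Claim_ definition above) =====
theorem bmes_to_words_spec : Claim_equal_bmes_to_words := by
  intro results require_s _hdom hpre
  obtain ⟨hWs, hTs, hWne, hTne, _, hchars⟩ := hpre
  obtain ⟨chars, hW⟩ := Option.isSome_iff_exists.mp hWs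
  obtain ⟨tags, hT⟩ := Option.isSome_iff_exists.mp hTs
  rw [hW] at hWne hchars
  rw [hT] at hTne hchars
  simp only [Option.getD_some] at hWne hTne hchars
  cases chars with
  | nil => exact absurd rfl hWne
  | cons c0 cr =>
      cases tags with
      | nil => exact absurd rfl hTne
      | cons t0 tr =>
          unfold Spec_bmes_to_words
          apply pv_ports_eq results require_s c0 cr t0 tr hW hT
          intro c hc
          apply hchars c
          have hmin : min (c0 :: cr).length (t0 :: tr).length = min cr.length tr.length + 1 := by
            simp
          rw [hmin]
          exact hc
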